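-- pv_equiv track=rewrite | github.com/AceTheDactyl/bloomcoin-v2 | garden/gradient_schema/euler_gradient.py | get_line_through_points
-- ===== SOURCE A (Python) =====
-- from typing import Dict, List, Tuple, Optional, Set, FrozenSet
--
-- FANO_LINE_SET: List[FrozenSet[int]] = [
--     frozenset({0, 1, 3}),  # Line 0
--     frozenset({1, 2, 4}),  # Line 1
--     frozenset({2, 3, 5}),  # Line 2
--     frozenset({3, 4, 6}),  # Line 3
--     frozenset({4, 5, 0}),  # Line 4 - THE PLUS LINE
--     frozenset({5, 6, 1}),  # Line 5
--     frozenset({6, 0, 2}),  # Line 6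
-- ]
--
-- def get_line_through_points(p1: int, p2: int) -> FrozenSet[int]:
--     """
--     Get the unique Fano line through two distinct points.
--
--     In a projective plane, any two distinct points determine exactly one line.
--
--     Args:
--         p1, p2: Two distinct integers in 0-6
--
--     Returns:
--         Frozenset containing the three points on the line
--
--     Raises:
--         ValueError: If points are equal or not in 0-6
--     """
--     if p1 == p2:
--         raise ValueError("Points must be distinct")
--     if not (0 <= p1 <= 6 and 0 <= p2 <= 6):
--         raise ValueError(f"Points must be in 0-6, got ({p1}, {p2})")
--
--     for line in FANO_LINE_SET:
--         if p1 in line and p2 in line: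
--             return line
--
--     # Should never reach here for valid Fano plane
--     raise RuntimeError(f"No line found through points {p1} and {p2}")
-- ===== SOURCE B (Python) =====
-- from typing import Dict, List, Tuple, FrozenSet
--
-- FANO_LINE_SET: List[FrozenSet[int]] = [
--     frozenset({0, 1, 3}),
--     frozenset({1, 2, 4}),
--     frozenset({2, 3, 5}),
--     frozenset({3, 4, 6}),
--     frozenset({4, 5, 0}),
--     frozenset({5, 6, 1}),
--     frozenset({6, 0, 2}),
-- ]
--
-- # Index built once: every unordered pair of points -> the unique line containing it.
-- PAIR_TO_LINE: Dict[Tuple[int, int], FrozenSet[int]] = {}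
-- for _line in FANO_LINE_SET:
--     _pts = sorted(_line)
--     for _i in range(3):
--         for _j in range(_i + 1, 3):
--             PAIR_TO_LINE[(_pts[_i], _pts[_j])] = _line
--
-- def get_line_through_points(p1: int, p2: int) -> FrozenSet[int]:
--     if p1 == p2:
--         raise ValueError("Points must be distinct")
--     if not (0 <= p1 <= 6 and 0 <= p2 <= 6):
--         raise ValueError(f"Points must be in 0-6, got ({p1}, {p2})")
--     key = (p1, p2) if p1 < p2 else (p2, p1)
--     line = PAIR_TO_LINE.get(key)
--     if line is None:
--         raise RuntimeError(f"No line found through points {p1} and {p2}")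
--     return line
-- ===== Notes on version B (the rewrite author's own statement) =====
-- stated objective: idiomatic
-- what changed: Replaces A's per-call linear scan over the seven Fano lines with a module-level pair-to-line dictionary built once, so each call is a single keyed lookup.
import Mathlib
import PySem

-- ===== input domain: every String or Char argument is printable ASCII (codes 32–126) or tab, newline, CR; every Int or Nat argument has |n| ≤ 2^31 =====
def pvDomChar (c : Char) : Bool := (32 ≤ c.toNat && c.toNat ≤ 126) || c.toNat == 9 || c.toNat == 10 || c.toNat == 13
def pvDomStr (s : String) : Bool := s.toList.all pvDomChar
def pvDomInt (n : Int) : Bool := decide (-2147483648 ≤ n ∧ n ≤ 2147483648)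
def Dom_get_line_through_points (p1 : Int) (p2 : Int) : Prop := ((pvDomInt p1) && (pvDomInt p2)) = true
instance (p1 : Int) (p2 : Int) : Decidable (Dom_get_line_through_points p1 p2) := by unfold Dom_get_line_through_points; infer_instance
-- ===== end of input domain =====

-- B replaces A's per-call linear scan of the 7 Fano lines with a pair->line dictionary built once at module load; return-value equivalence on distinct in-range points (ValueError inputs are excluded by Pre_).

-- ===== PORT A =====
-- Frozensets become lists of their distinct elements (PySem set convention).
def fanoLineSet : List (List Int) :=
  [[0, 1, 3], [1, 2, 4], [2, 3, 5], [3, 4, 6], [0, 4, 5], [1, 5, 6], [0, 2, 6]]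

-- A's loop: first line containing both points; the guards and the unreachable
-- RuntimeError are Python raises, i.e. inputs outside Pre_ (getD [] is never hit there).
def get_line_through_points (p1 : Int) (p2 : Int) : List Int :=
  (fanoLineSet.find? (fun line => line.contains p1 && line.contains p2)).getD []

-- ===== PORT B =====
-- Source B's module-level index build: for each line, insert every sorted pair of its points.
def pairToLine : PySem.Dict (Int × Int) (List Int) :=
  fanoLineSet.foldl
    (fun d line =>
      let pts := PySem.List.sorted line (fun x => x)
      (PySem.List.pyRange 0 3 1).foldl
        (fun d i =>
          (PySem.List.pyRange (i + 1) 3 1).foldl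
            (fun d j => d.insert (PySem.List.pyGetD pts i 0, PySem.List.pyGetD pts j 0) line)
            d)
        d)
    PySem.Dict.empty

-- Guard failures raise (outside Pre_); the impossible-missing-key RuntimeError likewise.
def get_line_through_points_alt (p1 : Int) (p2 : Int) : List Int :=
  let key := if p1 < p2 then (p1, p2) else (p2, p1)
  (pairToLine.get? key).getD []

-- ===== PRECONDITION & SPEC =====
-- Exactly where Python A returns: distinct points, both in 0..6 (else ValueError).
def Pre_get_line_through_points (p1 : Int) (p2 : Int) : Prop :=
  p1 ≠ p2 ∧ 0 ≤ p1 ∧ p1 ≤ 6 ∧ 0 ≤ p2 ∧ p2 ≤ 6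
instance (p1 : Int) (p2 : Int) : Decidable (Pre_get_line_through_points p1 p2) := by
  unfold Pre_get_line_through_points; infer_instance

def pvWitness_get_line_through_points : Int × Int := (5, 0)

def Spec_get_line_through_points (p1 : Int) (p2 : Int) (out : List Int) : Prop :=
  out = get_line_through_points_alt p1 p2
instance (p1 : Int) (p2 : Int) (out : List Int) : Decidable (Spec_get_line_through_points p1 p2 out) := by
  unfold Spec_get_line_through_points; infer_instance

-- ===== CLAIM =====
def Claim_equal_get_line_through_points : Prop :=
  ∀ (p1 : Int) (p2 : Int), Dom_get_line_through_points p1 p2 →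
    Pre_get_line_through_points p1 p2 →
    Spec_get_line_through_points p1 p2 (get_line_through_points p1 p2)

-- ===== LEMMAS AND PROOFS =====

-- ===== VERDICT =====
theorem get_line_through_points_spec : Claim_equal_get_line_through_points := by
  intro p1 p2 _ hpre
  obtain ⟨hne, h1, h2, h3, h4⟩ := hpre
  unfold Spec_get_line_through_points
  interval_cases p1 <;> interval_cases p2 <;> first | (exact absurd rfl hne) | decide
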